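-- pv_equiv track=rewrite | github.com/Alaxouche/MO2-Modular-Dashboard | Data/rules.py | _canon_key_map
-- ===== SOURCE A (Python) =====
-- from typing import Dict, List, Optional, Tuple
--
-- CATEGORY_ALIASES: Dict[str, List[str]] = {
--     "dlss": ["dlss", "DLSS", "framegen", "frame generation", "Frame Generation"],
--     "resolution": ["resolution", "Resolution"],
--     "difficulty": ["difficulty", "Difficulty"],
--     "main_menu": ["main_menu", "main menu", "Main Menu"],
--     "nsfw": ["nsfw", "NSFW"],
--     "gamepad": ["gamepad", "controller", "pad", "Gamepad"],
--     "graphics_framework": ["graphics_framework", "framework", "graphics framework", "Framework"],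
--     "enb_preset": ["enb_preset", "enb preset", "enb", "ENB Preset"],
--     "poise": ["poise", "poise_system", "Poise"],
--     "ini_base": ["ini_base", "ini base", "ini preset", "INI Base"],
--     "anti_aliasing": ["anti_aliasing", "anti aliasing", "aa", "Anti-aliasing"],
--     "npc_resistances": ["npc_resistances", "npc resistances", "NPC Resistances"],
--     "ui_mod": ["ui_mod", "ui mod", "ui", "UI Mod"],
--     "profile_overrides": ["profile_overrides", "profile overrides"],
-- }
--
-- def _canon_key_map(data: Dict) -> Dict[str, str]:
--     present = {k.lower(): k for k in data.keys()}
--     mapping: Dict[str, str] = {}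
--     for canon, aliases in CATEGORY_ALIASES.items():
--         for alias in aliases:
--             if alias.lower() in present:
--                 mapping[canon] = present[alias.lower()]
--                 break
--     return mapping
-- ===== SOURCE B (Python) =====
-- from typing import Dict, List
--
-- CATEGORY_ALIASES: Dict[str, List[str]] = {
--     "dlss": ["dlss", "DLSS", "framegen", "frame generation", "Frame Generation"],
--     "resolution": ["resolution", "Resolution"],
--     "difficulty": ["difficulty", "Difficulty"],
--     "main_menu": ["main_menu", "main menu", "Main Menu"],
--     "nsfw": ["nsfw", "NSFW"],
--     "gamepad": ["gamepad", "controller", "pad", "Gamepad"],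
--     "graphics_framework": ["graphics_framework", "framework", "graphics framework", "Framework"],
--     "enb_preset": ["enb_preset", "enb preset", "enb", "ENB Preset"],
--     "poise": ["poise", "poise_system", "Poise"],
--     "ini_base": ["ini_base", "ini base", "ini preset", "INI Base"],
--     "anti_aliasing": ["anti_aliasing", "anti aliasing", "aa", "Anti-aliasing"],
--     "npc_resistances": ["npc_resistances", "npc resistances", "NPC Resistances"],
--     "ui_mod": ["ui_mod", "ui mod", "ui", "UI Mod"],
--     "profile_overrides": ["profile_overrides", "profile overrides"],
-- }
--
-- # reverse index: lowercased alias -> (canon, priority = position of its first occurrence)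
-- _REV: Dict[str, tuple] = {}
-- for _canon, _aliases in CATEGORY_ALIASES.items():
--     for _i, _alias in enumerate(_aliases):
--         _REV.setdefault(_alias.lower(), (_canon, _i))
--
-- def _canon_key_map(data: Dict) -> Dict[str, str]:
--     best: Dict[str, int] = {}
--     pick: Dict[str, str] = {}
--     for k in data.keys():
--         hit = _REV.get(k.lower())
--         if hit is not None:
--             canon, idx = hit
--             b = best.get(canon)
--             if b is None or idx <= b:
--                 best[canon] = idx
--                 pick[canon] = k
--     return {canon: pick[canon] for canon in CATEGORY_ALIASES if canon in pick}
-- ===== Notes on version B (the rewrite author's own statement) =====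
-- stated objective: alternative
-- what changed: Replaces A's lowercase->key 'present' dict plus a per-canon scan over each alias list by a precomputed reverse index (lowercased alias -> (canon, priority)) and a single pass over the data keys that keeps, per canon, the key with the smallest priority (last key wins on ties), emitting the result in canonical order.
import Mathlib
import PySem

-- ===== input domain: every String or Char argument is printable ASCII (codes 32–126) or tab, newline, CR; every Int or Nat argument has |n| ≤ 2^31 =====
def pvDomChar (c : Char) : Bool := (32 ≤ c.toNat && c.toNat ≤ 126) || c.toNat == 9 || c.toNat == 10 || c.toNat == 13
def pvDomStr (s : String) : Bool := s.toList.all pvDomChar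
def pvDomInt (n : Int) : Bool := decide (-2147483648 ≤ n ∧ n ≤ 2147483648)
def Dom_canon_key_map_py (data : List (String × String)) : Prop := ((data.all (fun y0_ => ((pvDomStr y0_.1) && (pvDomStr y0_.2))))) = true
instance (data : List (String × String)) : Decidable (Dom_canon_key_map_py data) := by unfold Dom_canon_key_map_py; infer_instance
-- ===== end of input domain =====

set_option maxRecDepth 100000


-- B replaces A's per-canon scans over a `present` dict by a precomputed reverse index
-- (lowercased alias -> (canon, priority)) and a single pass over the data keys (objective: alternative).

-- the module constant CATEGORY_ALIASES (shared context of both programs)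
def categoryAliases : List (String × List String) :=
  [ ("dlss", ["dlss", "DLSS", "framegen", "frame generation", "Frame Generation"]),
    ("resolution", ["resolution", "Resolution"]),
    ("difficulty", ["difficulty", "Difficulty"]),
    ("main_menu", ["main_menu", "main menu", "Main Menu"]),
    ("nsfw", ["nsfw", "NSFW"]),
    ("gamepad", ["gamepad", "controller", "pad", "Gamepad"]),
    ("graphics_framework", ["graphics_framework", "framework", "graphics framework", "Framework"]),
    ("enb_preset", ["enb_preset", "enb preset", "enb", "ENB Preset"]),
    ("poise", ["poise", "poise_system", "Poise"]),
    ("ini_base", ["ini_base", "ini base", "ini preset", "INI Base"]),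
    ("anti_aliasing", ["anti_aliasing", "anti aliasing", "aa", "Anti-aliasing"]),
    ("npc_resistances", ["npc_resistances", "npc resistances", "NPC Resistances"]),
    ("ui_mod", ["ui_mod", "ui mod", "ui", "UI Mod"]),
    ("profile_overrides", ["profile_overrides", "profile overrides"]) ]

-- ===== PORT A =====
-- the inner `for alias in aliases: … break` loop of A
def firstAliasHit (aliases : List String) (present : PySem.Dict String String) : Option String :=
  match aliases with
  | [] => none
  | a :: rest =>
    match present.get? (PySem.Str.lower a) with
    | some k => some k
    | none => firstAliasHit rest present

def canon_key_map_py (data : List (String × String)) : List (String × String) :=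
  let present := data.foldl (fun d kv => d.insert (PySem.Str.lower kv.1) kv.1) PySem.Dict.empty
  let mapping := categoryAliases.foldl (fun m ca =>
    match firstAliasHit ca.2 present with
    | some k => m.insert ca.1 k
    | none => m) PySem.Dict.empty
  mapping.items

-- ===== PORT B =====
-- the module-level reverse index _REV of Source B: lowercased alias -> (canon, priority)
def revIndex : PySem.Dict String (String × Int) :=
  categoryAliases.foldl (fun r ca =>
    (PySem.List.enumerate ca.2).foldl (fun r ia => r.setdefault (PySem.Str.lower ia.2) (ca.1, ia.1)) r)
    PySem.Dict.empty

def canon_key_map_py_alt (data : List (String × String)) : List (String × String) :=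
  let bp := data.foldl (fun (bp : PySem.Dict String Int × PySem.Dict String String) kv =>
    match revIndex.get? (PySem.Str.lower kv.1) with
    | none => bp
    | some ci =>
      match bp.1.get? ci.1 with
      | none => (bp.1.insert ci.1 ci.2, bp.2.insert ci.1 kv.1)
      | some b => if ci.2 ≤ b then (bp.1.insert ci.1 ci.2, bp.2.insert ci.1 kv.1) else bp)
    (PySem.Dict.empty, PySem.Dict.empty)
  (categoryAliases.foldl (fun m ca =>
    match bp.2.get? ca.1 with
    | some k => m.insert ca.1 k
    | none => m) PySem.Dict.empty).items

-- ===== PRECONDITION & SPEC =====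
def Spec_canon_key_map_py (data : List (String × String)) (out : List (String × String)) : Prop := out = canon_key_map_py_alt data
instance (data : List (String × String)) (out : List (String × String)) : Decidable (Spec_canon_key_map_py data out) := by unfold Spec_canon_key_map_py; infer_instance

-- ===== CLAIM (what is proved, stated in full; the proofs are below) =====
def Claim_equal_canon_key_map_py : Prop := ∀ (data : List (String × String)), Dom_canon_key_map_py data → Spec_canon_key_map_py data (canon_key_map_py data)

-- ===== LEMMAS AND PROOFS =====


-- the last data key whose lowercase equals l (what A's `present[l]` holds at the end)
def lastLow (l : String) (data : List (String × String)) : Option String :=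
  data.foldl (fun acc kv => if PySem.Str.lower kv.1 = l then some kv.1 else acc) none

-- B's single pass projected to one canon: (best index, picked key) computed from the canon's
-- (lowered alias, priority) pairs
def T (pairs : List (String × Int)) (data : List (String × String)) : Option Int × Option String :=
  match pairs.findSome? (fun p => (lastLow p.1 data).map (fun k => (p.2, k))) with
  | some ik => (some ik.1, some ik.2)
  | none => (none, none)

-- the step of B's single pass (the inline lambda of canon_key_map_py_alt, named for the proofs)
def bStep (bp : PySem.Dict String Int × PySem.Dict String String) (kv : String × String) :
    PySem.Dict String Int × PySem.Dict String String :=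
  match revIndex.get? (PySem.Str.lower kv.1) with
  | none => bp
  | some ci =>
    match bp.1.get? ci.1 with
    | none => (bp.1.insert ci.1 ci.2, bp.2.insert ci.1 kv.1)
    | some b => if ci.2 ≤ b then (bp.1.insert ci.1 ci.2, bp.2.insert ci.1 kv.1) else bp

theorem lastLow_snoc (l : String) (data : List (String × String)) (kv : String × String) :
    lastLow l (data ++ [kv]) = if PySem.Str.lower kv.1 = l then some kv.1 else lastLow l data := by
  simp [lastLow, List.foldl_append]

theorem findSome?_congr_mem {α β : Type} (l : List α) (f g : α → Option β)
    (h : ∀ x ∈ l, f x = g x) : l.findSome? f = l.findSome? g := by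
  induction l with
  | nil => rfl
  | cons a t ih =>
    simp only [List.findSome?]
    rw [h a (by simp)]
    cases g a with
    | none => exact ih (fun x hx => h x (by simp [hx]))
    | some _ => rfl

theorem presentGet (data : List (String × String)) (l : String) :
    (data.foldl (fun d kv => d.insert (PySem.Str.lower kv.1) kv.1) PySem.Dict.empty).get? l
      = lastLow l data := by
  induction data using List.reverseRecOn with
  | nil => simp [lastLow, PySem.Dict.get?_empty]
  | append_singleton t kv ih =>
    rw [List.foldl_append, lastLow_snoc]
    simp only [List.foldl]
    rw [PySem.Dict.get?_insert]
    by_cases h : l = PySem.Str.lower kv.1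
    · simp [h]
    · rw [if_neg h, if_neg (fun hh => h hh.symm), ih]

theorem firstAliasHit_eq (aliases : List String) (data : List (String × String)) :
    firstAliasHit aliases (data.foldl (fun d kv => d.insert (PySem.Str.lower kv.1) kv.1) PySem.Dict.empty)
      = aliases.findSome? (fun a => lastLow (PySem.Str.lower a) data) := by
  induction aliases with
  | nil => rfl
  | cons a rest ih =>
    simp only [firstAliasHit, List.findSome?, presentGet]
    cases lastLow (PySem.Str.lower a) data <;> simp [ih]

theorem T_nil (pairs : List (String × Int)) : T pairs [] = (none, none) := by
  induction pairs with
  | nil => rfl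
  | cons p rest ih =>
    unfold T at ih ⊢
    rw [List.findSome?_cons]
    simpa [lastLow] using ih

theorem T_snoc_miss (pairs : List (String × Int)) (data : List (String × String)) (kv : String × String)
    (h : ∀ p ∈ pairs, p.1 ≠ PySem.Str.lower kv.1) :
    T pairs (data ++ [kv]) = T pairs data := by
  unfold T
  rw [findSome?_congr_mem pairs _ (fun p => (lastLow p.1 data).map (fun k => (p.2, k)))
      (fun p hp => by rw [lastLow_snoc]; simp [Ne.symm (h p hp)])]

-- T after one more key whose lowercase carries the pair (lkv, i) of the canon
theorem T_snoc_hit (pairs : List (String × Int)) (lkv : String) (i : Int)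
    (hsorted : pairs.Pairwise (fun p q => p.2 < q.2))
    (hnodup : (pairs.map Prod.fst).Nodup)
    (hmem : (lkv, i) ∈ pairs)
    (data : List (String × String)) (kv : String × String) (hkv : PySem.Str.lower kv.1 = lkv) :
    T pairs (data ++ [kv]) = match (T pairs data).1 with
      | none => (some i, some kv.1)
      | some b => if i ≤ b then (some i, some kv.1) else T pairs data := by
  induction pairs with
  | nil => cases hmem
  | cons p rest ih =>
    rw [List.pairwise_cons] at hsorted
    rw [List.map_cons, List.nodup_cons] at hnodup
    by_cases hp : p.1 = lkv
    · have hpi : p = (lkv, i) := by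
        cases List.mem_cons.mp hmem with
        | inl h => exact h.symm
        | inr h =>
          exact absurd (hp ▸ (List.mem_map.mpr ⟨(lkv, i), h, rfl⟩)) hnodup.1
      subst hpi
      unfold T
      rw [List.findSome?_cons, List.findSome?_cons, lastLow_snoc]
      rw [if_pos hkv]
      cases hL : lastLow lkv data with
      | some k0 => simp
      | none =>
        simp only [Option.map_none]
        cases hR : List.findSome? (fun p => (lastLow p.1 data).map fun k => (p.2, k)) rest with
        | none => simp
        | some ik =>
          obtain ⟨q, hq, hfq⟩ := List.exists_of_findSome?_eq_some hR
          have hlt : i < ik.1 := by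
            cases hLq : lastLow q.1 data <;> rw [hLq] at hfq
            · cases hfq
            · cases hfq
              exact hsorted.1 q hq
          simp [le_of_lt hlt]
    · have hmem' : (lkv, i) ∈ rest := by
        cases List.mem_cons.mp hmem with
        | inl h => exact absurd (congrArg Prod.fst h.symm) hp
        | inr h => exact h
      unfold T
      rw [List.findSome?_cons, List.findSome?_cons, lastLow_snoc,
        if_neg (fun hh : PySem.Str.lower kv.1 = p.1 => hp (hkv ▸ hh.symm))]
      cases hL : lastLow p.1 data with
      | some k0 =>
        have hlt : p.2 < i := hsorted.1 _ hmem'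
        simp [not_le.mpr hlt]
      | none =>
        have hrec := ih hsorted.2 hnodup.2 hmem'
        unfold T at hrec
        simp only [Option.map_none]
        cases hR : List.findSome? (fun p => (lastLow p.1 data).map fun k => (p.2, k)) rest <;>
          rw [hR] at hrec <;> simpa using hrec

set_option maxRecDepth 100000 in
theorem revNodup : revIndex.keys.Nodup := by decide

set_option maxRecDepth 100000 in
theorem revItems : revIndex.items =
  [("dlss", ("dlss", 0)), ("framegen", ("dlss", 2)), ("frame generation", ("dlss", 3)),
   ("resolution", ("resolution", 0)), ("difficulty", ("difficulty", 0)),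
   ("main_menu", ("main_menu", 0)), ("main menu", ("main_menu", 1)), ("nsfw", ("nsfw", 0)),
   ("gamepad", ("gamepad", 0)), ("controller", ("gamepad", 1)), ("pad", ("gamepad", 2)),
   ("graphics_framework", ("graphics_framework", 0)), ("framework", ("graphics_framework", 1)),
   ("graphics framework", ("graphics_framework", 2)), ("enb_preset", ("enb_preset", 0)),
   ("enb preset", ("enb_preset", 1)), ("enb", ("enb_preset", 2)), ("poise", ("poise", 0)),
   ("poise_system", ("poise", 1)), ("ini_base", ("ini_base", 0)), ("ini base", ("ini_base", 1)),
   ("ini preset", ("ini_base", 2)), ("anti_aliasing", ("anti_aliasing", 0)),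
   ("anti aliasing", ("anti_aliasing", 1)), ("aa", ("anti_aliasing", 2)),
   ("anti-aliasing", ("anti_aliasing", 3)), ("npc_resistances", ("npc_resistances", 0)),
   ("npc resistances", ("npc_resistances", 1)), ("ui_mod", ("ui_mod", 0)),
   ("ui mod", ("ui_mod", 1)), ("ui", ("ui_mod", 2)), ("profile_overrides", ("profile_overrides", 0)),
   ("profile overrides", ("profile_overrides", 1))] := by decide

set_option maxRecDepth 100000 in
theorem revKeys : revIndex.keys =
  ["dlss", "framegen", "frame generation", "resolution", "difficulty", "main_menu", "main menu",
   "nsfw", "gamepad", "controller", "pad", "graphics_framework", "framework", "graphics framework",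
   "enb_preset", "enb preset", "enb", "poise", "poise_system", "ini_base", "ini base", "ini preset",
   "anti_aliasing", "anti aliasing", "aa", "anti-aliasing", "npc_resistances", "npc resistances",
   "ui_mod", "ui mod", "ui", "profile_overrides", "profile overrides"] := by decide

-- B's fold, projected to the state of one canon c
theorem bFold_proj (pairs : List (String × Int)) (c : String)
    (hA : ∀ p ∈ revIndex.items, (p.2.1 = c → (p.1, p.2.2) ∈ pairs) ∧ (p.2.1 ≠ c → p.1 ∉ pairs.map Prod.fst))
    (hkeys : ∀ l ∈ pairs.map Prod.fst, l ∈ revIndex.keys)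
    (hsorted : pairs.Pairwise (fun p q => p.2 < q.2))
    (hnodup : (pairs.map Prod.fst).Nodup)
    (data : List (String × String)) :
    ((data.foldl bStep (PySem.Dict.empty, PySem.Dict.empty)).1.get? c,
     (data.foldl bStep (PySem.Dict.empty, PySem.Dict.empty)).2.get? c) = T pairs data := by
  induction data using List.reverseRecOn with
  | nil => simp [PySem.Dict.get?_empty, T_nil]
  | append_singleton t kv ih =>
    rw [List.foldl_append]
    simp only [List.foldl]
    have ih1 : (t.foldl bStep (PySem.Dict.empty, PySem.Dict.empty)).1.get? c = (T pairs t).1 :=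
      congrArg Prod.fst ih
    cases hrev : revIndex.get? (PySem.Str.lower kv.1) with
    | none =>
      have hmiss : ∀ p ∈ pairs, p.1 ≠ PySem.Str.lower kv.1 := by
        intro p hp heq
        exact ((PySem.Dict.get?_eq_none_iff_not_mem_keys _ _).mp hrev)
          (heq ▸ hkeys p.1 (List.mem_map.mpr ⟨p, hp, rfl⟩))
      rw [show bStep (t.foldl bStep (PySem.Dict.empty, PySem.Dict.empty)) kv
            = t.foldl bStep (PySem.Dict.empty, PySem.Dict.empty) from by unfold bStep; rw [hrev],
          T_snoc_miss _ _ _ hmiss]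
      exact ih
    | some ci =>
      have hitem := (PySem.Dict.get?_eq_some_iff_mem_items _ _ _ revNodup).mp hrev
      rw [show bStep (t.foldl bStep (PySem.Dict.empty, PySem.Dict.empty)) kv
            = (match (t.foldl bStep (PySem.Dict.empty, PySem.Dict.empty)).1.get? ci.1 with
               | none => ((t.foldl bStep (PySem.Dict.empty, PySem.Dict.empty)).1.insert ci.1 ci.2,
                          (t.foldl bStep (PySem.Dict.empty, PySem.Dict.empty)).2.insert ci.1 kv.1)
               | some b =>
                 if ci.2 ≤ b then
                   ((t.foldl bStep (PySem.Dict.empty, PySem.Dict.empty)).1.insert ci.1 ci.2,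
                    (t.foldl bStep (PySem.Dict.empty, PySem.Dict.empty)).2.insert ci.1 kv.1)
                 else t.foldl bStep (PySem.Dict.empty, PySem.Dict.empty))
          from by unfold bStep; rw [hrev]]
      by_cases hc : ci.1 = c
      · have hmemp : (PySem.Str.lower kv.1, ci.2) ∈ pairs := ((hA _ hitem).1 hc)
        have hT := T_snoc_hit pairs _ _ hsorted hnodup hmemp t kv rfl
        rw [hT, hc, ih1]
        cases hTt : (T pairs t).1 with
        | none => simp [PySem.Dict.get?_insert_self]
        | some b =>
          by_cases hle : ci.2 ≤ b
          · simp [hle, PySem.Dict.get?_insert_self]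
          · simpa [hle] using ih
      · have hnotin : PySem.Str.lower kv.1 ∉ pairs.map Prod.fst := (hA _ hitem).2 hc
        have hmiss : ∀ p ∈ pairs, p.1 ≠ PySem.Str.lower kv.1 :=
          fun p hp heq => hnotin (heq ▸ List.mem_map.mpr ⟨p, hp, rfl⟩)
        rw [T_snoc_miss _ _ _ hmiss, ← ih]
        have hne : c ≠ ci.1 := fun hh => hc hh.symm
        cases hb : (t.foldl bStep (PySem.Dict.empty, PySem.Dict.empty)).1.get? ci.1 with
        | none => simp [PySem.Dict.get?_insert, hne]
        | some b =>
          by_cases hle : ci.2 ≤ b <;> simp [hle, PySem.Dict.get?_insert, hne]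

theorem canonKey_dlss (data : List (String × String)) :
    firstAliasHit ["dlss", "DLSS", "framegen", "frame generation", "Frame Generation"]
      (data.foldl (fun d kv => d.insert (PySem.Str.lower kv.1) kv.1) PySem.Dict.empty)
      = (data.foldl bStep (PySem.Dict.empty, PySem.Dict.empty)).2.get? "dlss" := by
  rw [firstAliasHit_eq,
    show (data.foldl bStep (PySem.Dict.empty, PySem.Dict.empty)).2.get? "dlss"
        = (T [("dlss", 0), ("framegen", 2), ("frame generation", 3)] data).2
      from congrArg Prod.snd (bFold_proj [("dlss", 0), ("framegen", 2), ("frame generation", 3)] "dlss"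
        (by rw [revItems]; decide) (by rw [revKeys]; decide) (by decide) (by decide) data)]
  simp only [T, List.findSome?_cons, List.findSome?_nil, show PySem.Str.lower "dlss" = "dlss" from rfl, show PySem.Str.lower "DLSS" = "dlss" from rfl, show PySem.Str.lower "framegen" = "framegen" from rfl, show PySem.Str.lower "frame generation" = "frame generation" from rfl, show PySem.Str.lower "Frame Generation" = "frame generation" from rfl]
  cases lastLow "dlss" data <;> cases lastLow "framegen" data <;> cases lastLow "frame generation" data <;> rfl

theorem canonKey_resolution (data : List (String × String)) :
    firstAliasHit ["resolution", "Resolution"]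
      (data.foldl (fun d kv => d.insert (PySem.Str.lower kv.1) kv.1) PySem.Dict.empty)
      = (data.foldl bStep (PySem.Dict.empty, PySem.Dict.empty)).2.get? "resolution" := by
  rw [firstAliasHit_eq,
    show (data.foldl bStep (PySem.Dict.empty, PySem.Dict.empty)).2.get? "resolution"
        = (T [("resolution", 0)] data).2
      from congrArg Prod.snd (bFold_proj [("resolution", 0)] "resolution"
        (by rw [revItems]; decide) (by rw [revKeys]; decide) (by decide) (by decide) data)]
  simp only [T, List.findSome?_cons, List.findSome?_nil, show PySem.Str.lower "resolution" = "resolution" from rfl, show PySem.Str.lower "Resolution" = "resolution" from rfl]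
  cases lastLow "resolution" data <;> rfl

theorem canonKey_difficulty (data : List (String × String)) :
    firstAliasHit ["difficulty", "Difficulty"]
      (data.foldl (fun d kv => d.insert (PySem.Str.lower kv.1) kv.1) PySem.Dict.empty)
      = (data.foldl bStep (PySem.Dict.empty, PySem.Dict.empty)).2.get? "difficulty" := by
  rw [firstAliasHit_eq,
    show (data.foldl bStep (PySem.Dict.empty, PySem.Dict.empty)).2.get? "difficulty"
        = (T [("difficulty", 0)] data).2
      from congrArg Prod.snd (bFold_proj [("difficulty", 0)] "difficulty"
        (by rw [revItems]; decide) (by rw [revKeys]; decide) (by decide) (by decide) data)]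
  simp only [T, List.findSome?_cons, List.findSome?_nil, show PySem.Str.lower "difficulty" = "difficulty" from rfl, show PySem.Str.lower "Difficulty" = "difficulty" from rfl]
  cases lastLow "difficulty" data <;> rfl

theorem canonKey_main_menu (data : List (String × String)) :
    firstAliasHit ["main_menu", "main menu", "Main Menu"]
      (data.foldl (fun d kv => d.insert (PySem.Str.lower kv.1) kv.1) PySem.Dict.empty)
      = (data.foldl bStep (PySem.Dict.empty, PySem.Dict.empty)).2.get? "main_menu" := by
  rw [firstAliasHit_eq,
    show (data.foldl bStep (PySem.Dict.empty, PySem.Dict.empty)).2.get? "main_menu"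
        = (T [("main_menu", 0), ("main menu", 1)] data).2
      from congrArg Prod.snd (bFold_proj [("main_menu", 0), ("main menu", 1)] "main_menu"
        (by rw [revItems]; decide) (by rw [revKeys]; decide) (by decide) (by decide) data)]
  simp only [T, List.findSome?_cons, List.findSome?_nil, show PySem.Str.lower "main_menu" = "main_menu" from rfl, show PySem.Str.lower "main menu" = "main menu" from rfl, show PySem.Str.lower "Main Menu" = "main menu" from rfl]
  cases lastLow "main_menu" data <;> cases lastLow "main menu" data <;> rfl

theorem canonKey_nsfw (data : List (String × String)) :
    firstAliasHit ["nsfw", "NSFW"]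
      (data.foldl (fun d kv => d.insert (PySem.Str.lower kv.1) kv.1) PySem.Dict.empty)
      = (data.foldl bStep (PySem.Dict.empty, PySem.Dict.empty)).2.get? "nsfw" := by
  rw [firstAliasHit_eq,
    show (data.foldl bStep (PySem.Dict.empty, PySem.Dict.empty)).2.get? "nsfw"
        = (T [("nsfw", 0)] data).2
      from congrArg Prod.snd (bFold_proj [("nsfw", 0)] "nsfw"
        (by rw [revItems]; decide) (by rw [revKeys]; decide) (by decide) (by decide) data)]
  simp only [T, List.findSome?_cons, List.findSome?_nil, show PySem.Str.lower "nsfw" = "nsfw" from rfl, show PySem.Str.lower "NSFW" = "nsfw" from rfl]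
  cases lastLow "nsfw" data <;> rfl

theorem canonKey_gamepad (data : List (String × String)) :
    firstAliasHit ["gamepad", "controller", "pad", "Gamepad"]
      (data.foldl (fun d kv => d.insert (PySem.Str.lower kv.1) kv.1) PySem.Dict.empty)
      = (data.foldl bStep (PySem.Dict.empty, PySem.Dict.empty)).2.get? "gamepad" := by
  rw [firstAliasHit_eq,
    show (data.foldl bStep (PySem.Dict.empty, PySem.Dict.empty)).2.get? "gamepad"
        = (T [("gamepad", 0), ("controller", 1), ("pad", 2)] data).2
      from congrArg Prod.snd (bFold_proj [("gamepad", 0), ("controller", 1), ("pad", 2)] "gamepad"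
        (by rw [revItems]; decide) (by rw [revKeys]; decide) (by decide) (by decide) data)]
  simp only [T, List.findSome?_cons, List.findSome?_nil, show PySem.Str.lower "gamepad" = "gamepad" from rfl, show PySem.Str.lower "controller" = "controller" from rfl, show PySem.Str.lower "pad" = "pad" from rfl, show PySem.Str.lower "Gamepad" = "gamepad" from rfl]
  cases lastLow "gamepad" data <;> cases lastLow "controller" data <;> cases lastLow "pad" data <;> rfl

theorem canonKey_graphics_framework (data : List (String × String)) :
    firstAliasHit ["graphics_framework", "framework", "graphics framework", "Framework"]
      (data.foldl (fun d kv => d.insert (PySem.Str.lower kv.1) kv.1) PySem.Dict.empty)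
      = (data.foldl bStep (PySem.Dict.empty, PySem.Dict.empty)).2.get? "graphics_framework" := by
  rw [firstAliasHit_eq,
    show (data.foldl bStep (PySem.Dict.empty, PySem.Dict.empty)).2.get? "graphics_framework"
        = (T [("graphics_framework", 0), ("framework", 1), ("graphics framework", 2)] data).2
      from congrArg Prod.snd (bFold_proj [("graphics_framework", 0), ("framework", 1), ("graphics framework", 2)] "graphics_framework"
        (by rw [revItems]; decide) (by rw [revKeys]; decide) (by decide) (by decide) data)]
  simp only [T, List.findSome?_cons, List.findSome?_nil, show PySem.Str.lower "graphics_framework" = "graphics_framework" from rfl, show PySem.Str.lower "framework" = "framework" from rfl, show PySem.Str.lower "graphics framework" = "graphics framework" from rfl, show PySem.Str.lower "Framework" = "framework" from rfl]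
  cases lastLow "graphics_framework" data <;> cases lastLow "framework" data <;> cases lastLow "graphics framework" data <;> rfl

theorem canonKey_enb_preset (data : List (String × String)) :
    firstAliasHit ["enb_preset", "enb preset", "enb", "ENB Preset"]
      (data.foldl (fun d kv => d.insert (PySem.Str.lower kv.1) kv.1) PySem.Dict.empty)
      = (data.foldl bStep (PySem.Dict.empty, PySem.Dict.empty)).2.get? "enb_preset" := by
  rw [firstAliasHit_eq,
    show (data.foldl bStep (PySem.Dict.empty, PySem.Dict.empty)).2.get? "enb_preset"
        = (T [("enb_preset", 0), ("enb preset", 1), ("enb", 2)] data).2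
      from congrArg Prod.snd (bFold_proj [("enb_preset", 0), ("enb preset", 1), ("enb", 2)] "enb_preset"
        (by rw [revItems]; decide) (by rw [revKeys]; decide) (by decide) (by decide) data)]
  simp only [T, List.findSome?_cons, List.findSome?_nil, show PySem.Str.lower "enb_preset" = "enb_preset" from rfl, show PySem.Str.lower "enb preset" = "enb preset" from rfl, show PySem.Str.lower "enb" = "enb" from rfl, show PySem.Str.lower "ENB Preset" = "enb preset" from rfl]
  cases lastLow "enb_preset" data <;> cases lastLow "enb preset" data <;> cases lastLow "enb" data <;> rfl

theorem canonKey_poise (data : List (String × String)) :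
    firstAliasHit ["poise", "poise_system", "Poise"]
      (data.foldl (fun d kv => d.insert (PySem.Str.lower kv.1) kv.1) PySem.Dict.empty)
      = (data.foldl bStep (PySem.Dict.empty, PySem.Dict.empty)).2.get? "poise" := by
  rw [firstAliasHit_eq,
    show (data.foldl bStep (PySem.Dict.empty, PySem.Dict.empty)).2.get? "poise"
        = (T [("poise", 0), ("poise_system", 1)] data).2
      from congrArg Prod.snd (bFold_proj [("poise", 0), ("poise_system", 1)] "poise"
        (by rw [revItems]; decide) (by rw [revKeys]; decide) (by decide) (by decide) data)]
  simp only [T, List.findSome?_cons, List.findSome?_nil, show PySem.Str.lower "poise" = "poise" from rfl, show PySem.Str.lower "poise_system" = "poise_system" from rfl, show PySem.Str.lower "Poise" = "poise" from rfl]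
  cases lastLow "poise" data <;> cases lastLow "poise_system" data <;> rfl

theorem canonKey_ini_base (data : List (String × String)) :
    firstAliasHit ["ini_base", "ini base", "ini preset", "INI Base"]
      (data.foldl (fun d kv => d.insert (PySem.Str.lower kv.1) kv.1) PySem.Dict.empty)
      = (data.foldl bStep (PySem.Dict.empty, PySem.Dict.empty)).2.get? "ini_base" := by
  rw [firstAliasHit_eq,
    show (data.foldl bStep (PySem.Dict.empty, PySem.Dict.empty)).2.get? "ini_base"
        = (T [("ini_base", 0), ("ini base", 1), ("ini preset", 2)] data).2
      from congrArg Prod.snd (bFold_proj [("ini_base", 0), ("ini base", 1), ("ini preset", 2)] "ini_base"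
        (by rw [revItems]; decide) (by rw [revKeys]; decide) (by decide) (by decide) data)]
  simp only [T, List.findSome?_cons, List.findSome?_nil, show PySem.Str.lower "ini_base" = "ini_base" from rfl, show PySem.Str.lower "ini base" = "ini base" from rfl, show PySem.Str.lower "ini preset" = "ini preset" from rfl, show PySem.Str.lower "INI Base" = "ini base" from rfl]
  cases lastLow "ini_base" data <;> cases lastLow "ini base" data <;> cases lastLow "ini preset" data <;> rfl

theorem canonKey_anti_aliasing (data : List (String × String)) :
    firstAliasHit ["anti_aliasing", "anti aliasing", "aa", "Anti-aliasing"]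
      (data.foldl (fun d kv => d.insert (PySem.Str.lower kv.1) kv.1) PySem.Dict.empty)
      = (data.foldl bStep (PySem.Dict.empty, PySem.Dict.empty)).2.get? "anti_aliasing" := by
  rw [firstAliasHit_eq,
    show (data.foldl bStep (PySem.Dict.empty, PySem.Dict.empty)).2.get? "anti_aliasing"
        = (T [("anti_aliasing", 0), ("anti aliasing", 1), ("aa", 2), ("anti-aliasing", 3)] data).2
      from congrArg Prod.snd (bFold_proj [("anti_aliasing", 0), ("anti aliasing", 1), ("aa", 2), ("anti-aliasing", 3)] "anti_aliasing"
        (by rw [revItems]; decide) (by rw [revKeys]; decide) (by decide) (by decide) data)]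
  simp only [T, List.findSome?_cons, List.findSome?_nil, show PySem.Str.lower "anti_aliasing" = "anti_aliasing" from rfl, show PySem.Str.lower "anti aliasing" = "anti aliasing" from rfl, show PySem.Str.lower "aa" = "aa" from rfl, show PySem.Str.lower "Anti-aliasing" = "anti-aliasing" from rfl]
  cases lastLow "anti_aliasing" data <;> cases lastLow "anti aliasing" data <;> cases lastLow "aa" data <;> cases lastLow "anti-aliasing" data <;> rfl

theorem canonKey_npc_resistances (data : List (String × String)) :
    firstAliasHit ["npc_resistances", "npc resistances", "NPC Resistances"]
      (data.foldl (fun d kv => d.insert (PySem.Str.lower kv.1) kv.1) PySem.Dict.empty)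
      = (data.foldl bStep (PySem.Dict.empty, PySem.Dict.empty)).2.get? "npc_resistances" := by
  rw [firstAliasHit_eq,
    show (data.foldl bStep (PySem.Dict.empty, PySem.Dict.empty)).2.get? "npc_resistances"
        = (T [("npc_resistances", 0), ("npc resistances", 1)] data).2
      from congrArg Prod.snd (bFold_proj [("npc_resistances", 0), ("npc resistances", 1)] "npc_resistances"
        (by rw [revItems]; decide) (by rw [revKeys]; decide) (by decide) (by decide) data)]
  simp only [T, List.findSome?_cons, List.findSome?_nil, show PySem.Str.lower "npc_resistances" = "npc_resistances" from rfl, show PySem.Str.lower "npc resistances" = "npc resistances" from rfl, show PySem.Str.lower "NPC Resistances" = "npc resistances" from rfl]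
  cases lastLow "npc_resistances" data <;> cases lastLow "npc resistances" data <;> rfl

theorem canonKey_ui_mod (data : List (String × String)) :
    firstAliasHit ["ui_mod", "ui mod", "ui", "UI Mod"]
      (data.foldl (fun d kv => d.insert (PySem.Str.lower kv.1) kv.1) PySem.Dict.empty)
      = (data.foldl bStep (PySem.Dict.empty, PySem.Dict.empty)).2.get? "ui_mod" := by
  rw [firstAliasHit_eq,
    show (data.foldl bStep (PySem.Dict.empty, PySem.Dict.empty)).2.get? "ui_mod"
        = (T [("ui_mod", 0), ("ui mod", 1), ("ui", 2)] data).2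
      from congrArg Prod.snd (bFold_proj [("ui_mod", 0), ("ui mod", 1), ("ui", 2)] "ui_mod"
        (by rw [revItems]; decide) (by rw [revKeys]; decide) (by decide) (by decide) data)]
  simp only [T, List.findSome?_cons, List.findSome?_nil, show PySem.Str.lower "ui_mod" = "ui_mod" from rfl, show PySem.Str.lower "ui mod" = "ui mod" from rfl, show PySem.Str.lower "ui" = "ui" from rfl, show PySem.Str.lower "UI Mod" = "ui mod" from rfl]
  cases lastLow "ui_mod" data <;> cases lastLow "ui mod" data <;> cases lastLow "ui" data <;> rfl

theorem canonKey_profile_overrides (data : List (String × String)) :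
    firstAliasHit ["profile_overrides", "profile overrides"]
      (data.foldl (fun d kv => d.insert (PySem.Str.lower kv.1) kv.1) PySem.Dict.empty)
      = (data.foldl bStep (PySem.Dict.empty, PySem.Dict.empty)).2.get? "profile_overrides" := by
  rw [firstAliasHit_eq,
    show (data.foldl bStep (PySem.Dict.empty, PySem.Dict.empty)).2.get? "profile_overrides"
        = (T [("profile_overrides", 0), ("profile overrides", 1)] data).2
      from congrArg Prod.snd (bFold_proj [("profile_overrides", 0), ("profile overrides", 1)] "profile_overrides"
        (by rw [revItems]; decide) (by rw [revKeys]; decide) (by decide) (by decide) data)]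
  simp only [T, List.findSome?_cons, List.findSome?_nil, show PySem.Str.lower "profile_overrides" = "profile_overrides" from rfl, show PySem.Str.lower "profile overrides" = "profile overrides" from rfl]
  cases lastLow "profile_overrides" data <;> cases lastLow "profile overrides" data <;> rfl

-- ===== VERDICT (by name: the statement is the Claim_ definition above) =====
theorem canon_key_map_py_spec : Claim_equal_canon_key_map_py := by
  intro data _
  unfold Spec_canon_key_map_py canon_key_map_py canon_key_map_py_alt
  show (categoryAliases.foldl (fun m ca =>
      match firstAliasHit ca.2 (data.foldl (fun d kv => d.insert (PySem.Str.lower kv.1) kv.1) PySem.Dict.empty) with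
      | some k => m.insert ca.1 k
      | none => m) PySem.Dict.empty).items
    = (categoryAliases.foldl (fun m ca =>
      match (data.foldl bStep (PySem.Dict.empty, PySem.Dict.empty)).2.get? ca.1 with
      | some k => m.insert ca.1 k
      | none => m) PySem.Dict.empty).items
  refine congrArg PySem.Dict.items (PySem.List.foldl_congr_mem categoryAliases _ _ _ ?_)
  intro acc ca hca
  have hkey : firstAliasHit ca.2 (data.foldl (fun d kv => d.insert (PySem.Str.lower kv.1) kv.1) PySem.Dict.empty)
      = (data.foldl bStep (PySem.Dict.empty, PySem.Dict.empty)).2.get? ca.1 := by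
    simp only [categoryAliases, List.mem_cons, List.not_mem_nil, or_false] at hca
    rcases hca with rfl|rfl|rfl|rfl|rfl|rfl|rfl|rfl|rfl|rfl|rfl|rfl|rfl|rfl
    · exact canonKey_dlss data
    · exact canonKey_resolution data
    · exact canonKey_difficulty data
    · exact canonKey_main_menu data
    · exact canonKey_nsfw data
    · exact canonKey_gamepad data
    · exact canonKey_graphics_framework data
    · exact canonKey_enb_preset data
    · exact canonKey_poise data
    · exact canonKey_ini_base data
    · exact canonKey_anti_aliasing data
    · exact canonKey_npc_resistances data
    · exact canonKey_ui_mod data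
    · exact canonKey_profile_overrides data
  rw [hkey]
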